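-- pv_equiv track=rewrite | github.com/TessFerrandez/algorithms | contest/w-286/lc-m-2217-find-palindrome-with-fixed-length.py | kthPalindrome1
-- ===== SOURCE A (Python) =====
-- from typing import List
--
-- def kthPalindrome1(queries: List[int], intLength: int) -> List[int]:
--     def get_inner(n, ilen):
--         if ilen == 1:
--             return str(n)
--         if ilen == 2:
--             return str(n) * 2
--
--         if ilen % 2 == 0:
--             ifactor = 10 ** ((ilen - 1) // 2)
--         else:
--             ifactor = 10 ** ((ilen) // 2)
--
--         outer = n // ifactor
--         inner = n % ifactor
--
--         return str(outer) + get_inner(inner, ilen - 2) + str(outer)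
--
--     if intLength % 2 == 0:
--         factor = 10 ** ((intLength - 1) // 2)
--     else:
--         factor = 10 ** ((intLength) // 2)
--
--     max_n = 9 * factor
--
--     result = []
--     for query in queries:
--         if query > max_n:
--             result.append(-1)
--         elif intLength == 1:
--             result.append(query)
--         elif intLength == 2:
--             result.append(int(str(query) * 2))
--         else:
--             outer = ((query - 1) // factor) + 1
--             inner = (query - 1) % factor
--             result.append(int(str(outer) + get_inner(inner, intLength - 2) + str(outer)))
--
--     return result
-- ===== SOURCE B (Python) =====
-- def kthPalindrome1(queries, intLength):
--     half = (intLength + 1) // 2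
--     base = 10 ** (half - 1)
--     count = 9 * base
--     result = []
--     for q in queries:
--         if q > count:
--             result.append(-1)
--         else:
--             s = str(base + q - 1)
--             t = s[::-1]
--             result.append(int(s + t[intLength % 2:]))
--     return result
-- ===== Notes on version B (the rewrite author's own statement) =====
-- stated objective: alternative
-- what changed: B builds each palindrome directly from its first half (prefix = 10^(half-1)+k-1, mirrored string) instead of A's per-query recursive digit-peeling get_inner over div/mod layers.
-- outside the precondition, e.g. on kthPalindrome1([0], 3): A returns [90], B returns [9]; on kthPalindrome1([-1], 3): A returns [80], B returns [8]; on kthPalindrome1([-1], 1): A returns [-1], B raises ValueError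
import Mathlib
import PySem

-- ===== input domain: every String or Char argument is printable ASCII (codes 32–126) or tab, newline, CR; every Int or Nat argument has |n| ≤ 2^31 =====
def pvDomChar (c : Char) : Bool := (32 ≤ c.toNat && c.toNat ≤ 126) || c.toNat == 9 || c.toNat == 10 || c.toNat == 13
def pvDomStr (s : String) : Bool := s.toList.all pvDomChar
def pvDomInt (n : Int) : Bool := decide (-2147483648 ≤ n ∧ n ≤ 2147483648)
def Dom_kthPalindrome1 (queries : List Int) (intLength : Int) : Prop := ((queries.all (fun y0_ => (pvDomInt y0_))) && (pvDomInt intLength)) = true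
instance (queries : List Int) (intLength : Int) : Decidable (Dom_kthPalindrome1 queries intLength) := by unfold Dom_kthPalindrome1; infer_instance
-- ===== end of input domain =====

-- B builds each palindrome directly from its first half (prefix 10^(half-1)+k-1, mirrored) instead of
-- A's per-query recursive digit-peeling; equivalence is proved for queries ≥ 1 (the task's natural domain).

-- ===== PORT A =====
-- get_inner, with a fuel parameter only to make the ilen-2 recursion total (Python's recursion
-- terminates exactly on the ilen ≥ 1 calls reached under Pre_; fuel is never exhausted there).
-- Python's 10 ** e is ported as 10 ^ e.toNat: every exponent reached under Pre_ is ≥ 0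
-- (a negative exponent would make Python compute floats, which happens only outside Pre_).
def getInnerA : Nat → Int → Int → List Char
  | 0, _, _ => []
  | fuel+1, n, ilen =>
    if ilen = 1 then PySem.Int.toChars n
    else if ilen = 2 then PySem.List.pyRepeat (PySem.Int.toChars n) 2
    else
      let ifactor : Int := if PySem.Int.mod ilen 2 = 0 then (10:Int) ^ ((PySem.Int.floordiv (ilen-1) 2).toNat) else (10:Int) ^ ((PySem.Int.floordiv ilen 2).toNat)
      let outer := PySem.Int.floordiv n ifactor
      let inner := PySem.Int.mod n ifactor
      PySem.Int.toChars outer ++ getInnerA fuel inner (ilen - 2) ++ PySem.Int.toChars outer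

-- Hand-ported comparison 'query > 9 * 10**e' (PySem has no float): for e ≥ 0 Python compares ints,
-- ported literally; for e < 0 Python's 9 * 10**e is a float in [0, 1), so an int q exceeds it
-- exactly when 1 ≤ q (float rounding/underflow of 10**e stays inside (0,1), never crossing an
-- integer, so the branch outcome is exact for every int q and e).
def pvGtNineTimesPow (q e : Int) : Bool :=
  if 0 ≤ e then decide (q > 9 * (10:Int) ^ e.toNat) else decide (1 ≤ q)

-- int(...) is PySem.Int.ofChars?; under Pre_ the argument is always a nonempty digit string, so the
-- ValueError default (.getD 0) is never taken inside Pre_.  'factor' (an int in Python whenever the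
-- non-(-1) branches run, i.e. intLength ≥ 1) is 10 ^ e.toNat; the 'query > max_n' guard is the
-- exact comparison pvGtNineTimesPow against max_n = 9 * 10**e.
def kthPalindrome1 (queries : List Int) (intLength : Int) : List Int :=
  let e : Int := if PySem.Int.mod intLength 2 = 0 then PySem.Int.floordiv (intLength-1) 2 else PySem.Int.floordiv intLength 2
  let factor : Int := (10:Int) ^ e.toNat
  queries.foldl (fun result query =>
    if pvGtNineTimesPow query e then result ++ [-1]
    else if intLength = 1 then result ++ [query]
    else if intLength = 2 then result ++ [(PySem.Int.ofChars? (PySem.List.pyRepeat (PySem.Int.toChars query) 2)).getD 0]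
    else
      let outer := PySem.Int.floordiv (query - 1) factor + 1
      let inner := PySem.Int.mod (query - 1) factor
      result ++ [(PySem.Int.ofChars? (PySem.Int.toChars outer ++ getInnerA intLength.toNat inner (intLength - 2) ++ PySem.Int.toChars outer)).getD 0]) []

-- ===== PORT B =====
-- s[::-1] is PySem.List.slice? … (-1) (total under step = -1, hence .getD []); t[intLength % 2:] is
-- slice; base = 10 ** (half - 1) is 10 ^ e.toNat and the 'q > count' guard is pvGtNineTimesPow
-- against count = 9 * 10**e, exactly as in port A (Source B meets the same int-vs-float comparison).
def kthPalindrome1_alt (queries : List Int) (intLength : Int) : List Int :=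
  let e : Int := PySem.Int.floordiv (intLength + 1) 2 - 1
  let base : Int := (10:Int) ^ e.toNat
  queries.foldl (fun result q =>
    if pvGtNineTimesPow q e then result ++ [-1]
    else
      let s := PySem.Int.toChars (base + q - 1)
      let t := (PySem.List.slice? s none none (-1)).getD []
      result ++ [(PySem.Int.ofChars? (s ++ PySem.List.slice t (some (PySem.Int.mod intLength 2)) none)).getD 0]) []

-- ===== PRECONDITION & SPEC =====
-- Pre_ restricts the queries to the task's natural domain (LeetCode 2217: queries[i] ≥ 1; any
-- intLength is admitted).  For a query < 1, A either raises (ValueError for intLength = 2 or for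
-- very negative queries; RecursionError/ZeroDivisionError for intLength ≤ 0) or returns accidental
-- leading-zero values that are artefacts of its digit-peeling, not k-th palindromes
-- (e.g. A([0], 3) = [90]; A([-1], 1) = [-1] while B raises there).
def Pre_kthPalindrome1 (queries : List Int) (intLength : Int) : Prop :=
  ∀ q ∈ queries, 1 ≤ q
instance (queries : List Int) (intLength : Int) : Decidable (Pre_kthPalindrome1 queries intLength) := by
  unfold Pre_kthPalindrome1; infer_instance

def pvWitness_kthPalindrome1 : List Int × Int := ([1, 5, 100], 3)

def Spec_kthPalindrome1 (queries : List Int) (intLength : Int) (out : List Int) : Prop := out = kthPalindrome1_alt queries intLength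
instance (queries : List Int) (intLength : Int) (out : List Int) : Decidable (Spec_kthPalindrome1 queries intLength out) := by unfold Spec_kthPalindrome1; infer_instance

-- ===== CLAIM (what is proved, stated in full; the proofs are below) =====
def Claim_equal_kthPalindrome1 : Prop := ∀ (queries : List Int) (intLength : Int), Dom_kthPalindrome1 queries intLength → Pre_kthPalindrome1 queries intLength → Spec_kthPalindrome1 queries intLength (kthPalindrome1 queries intLength)

-- ===== LEMMAS AND PROOFS =====

-- the decimal expansion of n to exactly d digits (most significant first, leading zeros kept)
def pvPad : Nat → Nat → List Char
  | 0, _ => []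
  | d+1, n => pvPad d (n / 10) ++ [Nat.digitChar (n % 10)]

theorem pvPad_length (d n : Nat) : (pvPad d n).length = d := by
  induction d generalizing n with
  | zero => rfl
  | succ d ih => simp [pvPad, ih]

theorem pvPad_cons (d n : Nat) (h : n < 10^(d+1)) :
    pvPad (d+1) n = Nat.digitChar (n / 10^d) :: pvPad d (n % 10^d) := by
  induction d generalizing n with
  | zero =>
    show pvPad 0 (n / 10) ++ [Nat.digitChar (n % 10)] = Nat.digitChar (n / 10^0) :: pvPad 0 (n % 10^0)
    simp only [pvPad, pow_zero, Nat.div_one]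
    rw [Nat.mod_eq_of_lt (by simpa using h)]
    rfl
  | succ d ih =>
    have h10 : n / 10 < 10^(d+1) := by
      rw [Nat.div_lt_iff_lt_mul (by norm_num)]
      calc n < 10^(d+1+1) := h
        _ = 10^(d+1) * 10 := by rw [pow_succ]
    have e1 : n / 10 / 10^d = n / 10^(d+1) := by
      rw [Nat.div_div_eq_div_mul, ← pow_succ']
    have e2 : n % 10^(d+1) / 10 = n / 10 % 10^d := by
      rw [show (10:Nat)^(d+1) = 10 * 10^d from pow_succ' 10 d]
      exact Nat.mod_mul_right_div_self n 10 (10^d)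
    have e3 : n % 10^(d+1) % 10 = n % 10 := Nat.mod_mod_of_dvd n ⟨10^d, pow_succ' 10 d⟩
    rw [show pvPad (d+1+1) n = pvPad (d+1) (n/10) ++ [Nat.digitChar (n%10)] from rfl,
        show pvPad (d+1) (n % 10^(d+1))
            = pvPad d (n % 10^(d+1) / 10) ++ [Nat.digitChar (n % 10^(d+1) % 10)] from rfl,
        e2, e3, ih _ h10, e1]
    simp

theorem pvToDigits_small (m : Nat) (h : m < 10) : Nat.toDigits 10 m = [Nat.digitChar m] := by
  interval_cases m <;> rfl

theorem pvToChars_small (k : Int) (h0 : 0 ≤ k) (h9 : k < 10) :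
    PySem.Int.toChars k = [Nat.digitChar k.toNat] := by
  simp only [PySem.Int.toChars, if_neg (by omega : ¬ k < 0)]
  exact pvToDigits_small k.toNat (by omega)

theorem pvTdc (d : Nat) : ∀ (f o n : Nat) (rest : List Char), 1 ≤ o → o ≤ 9 → n < 10^d → d + 1 ≤ f →
    Nat.toDigitsCore 10 f (o * 10^d + n) rest = Nat.digitChar o :: (pvPad d n ++ rest) := by
  induction d with
  | zero =>
    intro f o n rest h1 h9 hn hf
    obtain ⟨f, rfl⟩ : ∃ f', f = f' + 1 := ⟨f - 1, by omega⟩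
    have hn0 : n = 0 := by omega
    subst hn0
    simp only [Nat.toDigitsCore, pow_zero, mul_one, Nat.add_zero,
      Nat.div_eq_of_lt (by omega : o < 10), Nat.mod_eq_of_lt (by omega : o < 10)]
    simp [pvPad]
  | succ d ih =>
    intro f o n rest h1 h9 hn hf
    obtain ⟨f, rfl⟩ : ∃ f', f = f' + 1 := ⟨f - 1, by omega⟩
    have hm : o * 10^(d+1) + n = 10 * (o * 10^d) + n := by ring
    have hdiv : (o * 10^(d+1) + n) / 10 = o * 10^d + n / 10 := by
      rw [hm, Nat.mul_add_div (by norm_num)]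
    have hmod : (o * 10^(d+1) + n) % 10 = n % 10 := by
      rw [hm, Nat.mul_add_mod]
    have hne : ¬ ((o * 10^(d+1) + n) / 10 = 0) := by
      rw [hdiv]
      have h1p : 1 ≤ 10 ^ d := Nat.one_le_pow _ _ (by norm_num)
      have h2p : 10^d ≤ o * 10^d := Nat.le_mul_of_pos_left _ (by omega)
      omega
    have hlt : n / 10 < 10^d := by
      rw [Nat.div_lt_iff_lt_mul (by norm_num)]
      calc n < 10^(d+1) := hn
        _ = 10^d * 10 := by rw [pow_succ]
    rw [show Nat.toDigitsCore 10 (f+1) (o * 10^(d+1) + n) rest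
        = Nat.toDigitsCore 10 f ((o * 10^(d+1) + n) / 10)
            (Nat.digitChar ((o * 10^(d+1) + n) % 10) :: rest) from by
      conv_lhs => rw [Nat.toDigitsCore]
      rw [if_neg hne]]
    rw [hdiv, hmod, ih f o (n / 10) _ h1 h9 hlt (by omega)]
    rw [show pvPad (d+1) n = pvPad d (n / 10) ++ [Nat.digitChar (n % 10)] from rfl]
    simp

theorem pvToChars_split (d o n : Nat) (h1 : 1 ≤ o) (h9 : o ≤ 9) (hn : n < 10^d) :
    PySem.Int.toChars ((o * 10^d + n : Nat) : Int) = Nat.digitChar o :: pvPad d n := by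
  set m : Nat := o * 10^d + n with hm
  have hnn : ¬ ((m : Int) < 0) := by omega
  simp only [PySem.Int.toChars, if_neg hnn, Int.toNat_natCast]
  show Nat.toDigitsCore 10 (m+1) m [] = _
  rw [hm, pvTdc d (m+1) o n [] h1 h9 hn (by
    have hd : d < 10^d := Nat.lt_pow_self (by norm_num)
    have : 10^d ≤ o * 10^d := Nat.le_mul_of_pos_left _ (by omega)
    omega)]
  simp

-- the A-side factor and the B-side base agree: both are 10^((L+1)/2 - 1)
theorem pvFactor_eq (L : Nat) (h : 1 ≤ L) :
    (if PySem.Int.mod (L : Int) 2 = 0 then (10:Int) ^ ((PySem.Int.floordiv ((L : Int)-1) 2).toNat) else (10:Int) ^ ((PySem.Int.floordiv (L : Int) 2).toNat))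
      = ((10 ^ ((L+1)/2 - 1) : Nat) : Int) := by
  have hmod : PySem.Int.mod (L : Int) 2 = ((L % 2 : Nat) : Int) := by
    exact_mod_cast PySem.Int.mod_natCast L 2
  have hfd1 : PySem.Int.floordiv ((L : Int) - 1) 2 = (((L - 1) / 2 : Nat) : Int) := by
    rw [show ((L:Int) - 1) = (((L - 1 : Nat)) : Int) by omega]
    exact_mod_cast PySem.Int.floordiv_natCast (L-1) 2
  have hfd2 : PySem.Int.floordiv (L : Int) 2 = ((L / 2 : Nat) : Int) := by
    exact_mod_cast PySem.Int.floordiv_natCast L 2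
  rw [hmod, hfd1, hfd2]
  split_ifs with hp
  · have hp' : L % 2 = 0 := by exact_mod_cast hp
    simp only [Int.toNat_natCast]
    rw [show (L-1)/2 = (L+1)/2 - 1 from by omega]
    norm_cast
  · have hp' : L % 2 = 1 := by
      rcases Nat.mod_two_eq_zero_or_one L with h0 | h1
      · exact absurd (by exact_mod_cast h0 : ((L % 2 : Nat) : Int) = 0) hp
      · exact h1
    simp only [Int.toNat_natCast]
    rw [show L/2 = (L+1)/2 - 1 from by omega]
    norm_cast

-- characterisation of get_inner: the padded first half followed by its mirror (middle digit shared when odd)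
theorem pvGetInner_eq (fuel : Nat) : ∀ (L n : Nat), 1 ≤ L → L ≤ fuel → n < 10 ^ ((L+1)/2) →
    getInnerA fuel (n : Int) (L : Int)
      = pvPad ((L+1)/2) n ++ List.drop (L % 2) (pvPad ((L+1)/2) n).reverse := by
  induction fuel with
  | zero => intro L n h1 h2 _; omega
  | succ fuel ih =>
    intro L n h1 h2 hn
    rcases (by omega : L = 1 ∨ L = 2 ∨ 3 ≤ L) with rfl | rfl | h3
    · have hn' : n < 10 := by simpa using hn
      simp only [getInnerA, Nat.cast_one]
      rw [pvToChars_small ((n:Nat):Int) (by omega) (by exact_mod_cast hn'), Int.toNat_natCast]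
      rw [show ((1:Nat)+1)/2 = 1 from rfl, show (1:Nat) % 2 = 1 from rfl]
      simp [pvPad, Nat.mod_eq_of_lt hn']
    · have hn' : n < 10 := by simpa using hn
      simp only [getInnerA]
      rw [if_neg (by norm_num : ¬ (((2:Nat):Int) = 1)), if_pos (by norm_num : ((2:Nat):Int) = 2)]
      rw [pvToChars_small ((n:Nat):Int) (by omega) (by exact_mod_cast hn')]
      rw [PySem.List.pyRepeat_singleton, Int.toNat_natCast]
      rw [show ((2:Nat)+1)/2 = 1 from rfl, show (2:Nat) % 2 = 0 from rfl]
      simp [pvPad, Nat.mod_eq_of_lt hn', List.replicate]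
    · set c := (L+1)/2 with hc
      have hc2 : 2 ≤ c := by omega
      have hFpos : 0 < (10:Nat) ^ (c-1) := pow_pos (by norm_num) _
      simp only [getInnerA]
      rw [if_neg (by omega : ¬ ((L:Int) = 1)), if_neg (by omega : ¬ ((L:Int) = 2))]
      rw [pvFactor_eq L (by omega)]
      have hdiv : PySem.Int.floordiv (n:Int) ((10 ^ ((L+1)/2 - 1) : Nat) : Int)
          = ((n / 10 ^ (c-1) : Nat) : Int) := by
        exact_mod_cast PySem.Int.floordiv_natCast n (10 ^ (c-1))
      have hmod : PySem.Int.mod (n:Int) ((10 ^ ((L+1)/2 - 1) : Nat) : Int)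
          = ((n % 10 ^ (c-1) : Nat) : Int) := by
        exact_mod_cast PySem.Int.mod_natCast n (10 ^ (c-1))
      rw [hdiv, hmod]
      set o := n / 10 ^ (c-1) with ho
      set r := n % 10 ^ (c-1) with hr
      have hpow : (10:Nat)^c = 10 * 10^(c-1) := by
        conv_rhs => rw [← pow_succ']
        congr 1
        omega
      have ho9 : o < 10 := by
        rw [ho, Nat.div_lt_iff_lt_mul hFpos, ← hpow]
        exact hn
      have hrlt : r < 10 ^ (c-1) := Nat.mod_lt _ hFpos
      rw [pvToChars_small ((o:Nat):Int) (Int.natCast_nonneg o) (by exact_mod_cast ho9),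
          Int.toNat_natCast]
      rw [show (L:Int) - 2 = (((L - 2 : Nat)):Int) by omega]
      rw [ih (L-2) r (by omega) (by omega)
        (by rw [show (L-2+1)/2 = c - 1 from by omega]; exact hrlt)]
      rw [show (L-2+1)/2 = c - 1 from by omega]
      have hpadc : pvPad c n = Nat.digitChar o :: pvPad (c-1) r := by
        have h' := pvPad_cons (c-1) n (by rw [show c-1+1 = c from by omega]; exact hn)
        rw [show c-1+1 = c from by omega] at h'
        exact h'
      rw [hpadc, List.reverse_cons,
        List.drop_append_of_le_length (by rw [List.length_reverse, pvPad_length]; omega),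
        show (L-2) % 2 = L % 2 from by omega]
      simp

theorem pvBase_eq (L : Nat) (h : 1 ≤ L) :
    (10:Int) ^ ((PySem.Int.floordiv ((L:Int) + 1) 2 - 1).toNat) = ((10 ^ ((L+1)/2 - 1) : Nat) : Int) := by
  have h1 : PySem.Int.floordiv ((L:Int) + 1) 2 = (((L+1)/2 : Nat) : Int) := by
    rw [show ((L:Int) + 1) = (((L + 1 : Nat)) : Int) by omega]
    exact_mod_cast PySem.Int.floordiv_natCast (L+1) 2
  rw [h1, show ((((L+1)/2 : Nat)):Int) - 1 = ((((L+1)/2 - 1 : Nat)):Int) by omega,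
      Int.toNat_natCast]
  norm_cast

-- the two exponent expressions agree (floor division, every intLength)
theorem pvExp_eq (il : Int) :
    (if PySem.Int.mod il 2 = 0 then PySem.Int.floordiv (il-1) 2 else PySem.Int.floordiv il 2)
      = PySem.Int.floordiv (il + 1) 2 - 1 := by
  simp only [PySem.Int.mod_eq_emod_of_pos (show (0:Int) < 2 by norm_num),
    PySem.Int.floordiv_eq_ediv_of_pos (show (0:Int) < 2 by norm_num)]
  split_ifs with h <;> omega

-- the per-query value computed by each port
def pvElemA (intLength query : Int) : Int :=
  let e : Int := if PySem.Int.mod intLength 2 = 0 then PySem.Int.floordiv (intLength-1) 2 else PySem.Int.floordiv intLength 2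
  let factor : Int := (10:Int) ^ e.toNat
  if pvGtNineTimesPow query e then -1
  else if intLength = 1 then query
  else if intLength = 2 then (PySem.Int.ofChars? (PySem.List.pyRepeat (PySem.Int.toChars query) 2)).getD 0
  else
    let outer := PySem.Int.floordiv (query - 1) factor + 1
    let inner := PySem.Int.mod (query - 1) factor
    (PySem.Int.ofChars? (PySem.Int.toChars outer ++ getInnerA intLength.toNat inner (intLength - 2) ++ PySem.Int.toChars outer)).getD 0

def pvElemB (intLength q : Int) : Int :=
  let e : Int := PySem.Int.floordiv (intLength + 1) 2 - 1
  let base : Int := (10:Int) ^ e.toNat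
  if pvGtNineTimesPow q e then -1
  else
    let s := PySem.Int.toChars (base + q - 1)
    let t := (PySem.List.slice? s none none (-1)).getD []
    (PySem.Int.ofChars? (s ++ PySem.List.slice t (some (PySem.Int.mod intLength 2)) none)).getD 0

theorem pvFoldA (queries : List Int) (intLength : Int) :
    kthPalindrome1 queries intLength = queries.map (pvElemA intLength) := by
  have h : kthPalindrome1 queries intLength
      = List.foldl (fun acc q => acc ++ [pvElemA intLength q]) [] queries := by
    simp only [kthPalindrome1]
    apply PySem.List.foldl_congr_mem
    intro acc q _
    simp only [pvElemA]
    split_ifs <;> rfl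
  rw [h, PySem.List.foldl_append_singleton_eq_map, List.nil_append]

theorem pvFoldB (queries : List Int) (intLength : Int) :
    kthPalindrome1_alt queries intLength = queries.map (pvElemB intLength) := by
  have h : kthPalindrome1_alt queries intLength
      = List.foldl (fun acc q => acc ++ [pvElemB intLength q]) [] queries := by
    simp only [kthPalindrome1_alt]
    apply PySem.List.foldl_congr_mem
    intro acc q _
    simp only [pvElemB]
    split_ifs <;> rfl
  rw [h, PySem.List.foldl_append_singleton_eq_map, List.nil_append]

theorem pvElem_eq (intLength q : Int) (hq : 1 ≤ q) :
    pvElemA intLength q = pvElemB intLength q := by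
  simp only [pvElemA, pvElemB]
  rw [pvExp_eq intLength]
  by_cases hg : pvGtNineTimesPow q (PySem.Int.floordiv (intLength + 1) 2 - 1) = true
  · rw [if_pos hg, if_pos hg]
  · rw [if_neg hg, if_neg hg]
    by_cases h0e : 0 ≤ PySem.Int.floordiv (intLength + 1) 2 - 1
    swap
    · exfalso
      apply hg
      simp only [pvGtNineTimesPow, if_neg h0e]
      exact decide_eq_true hq
    have hL0 : 1 ≤ intLength := by
      rw [PySem.Int.floordiv_eq_ediv_of_pos (show (0:Int) < 2 by norm_num)] at h0e
      omega
    obtain ⟨L, rfl⟩ : ∃ L : Nat, intLength = (L : Int) := ⟨intLength.toNat, by omega⟩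
    have hL1 : 1 ≤ L := by omega
    simp only [pvGtNineTimesPow, if_pos h0e, decide_eq_true_eq, not_lt] at hg
    rw [pvBase_eq L hL1] at hg ⊢
    have hgt : ¬ q > 9 * ((10 ^ ((L+1)/2 - 1) : Nat) : Int) := not_lt.mpr hg
    rcases (by omega : L = 1 ∨ L = 2 ∨ 3 ≤ L) with rfl | rfl | h3
    · rw [if_pos (by norm_num : (((1:Nat)):Int) = 1)]
      have hq9 : q ≤ 9 := by norm_num at hgt; omega
      interval_cases q <;> decide
    · rw [if_neg (by norm_num : ¬ ((((2:Nat)):Int) = 1)),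
          if_pos (by norm_num : (((2:Nat)):Int) = 2)]
      have hq9 : q ≤ 9 := by norm_num at hgt; omega
      interval_cases q <;> decide
    · rw [if_neg (by omega : ¬ ((L:Int) = 1)), if_neg (by omega : ¬ ((L:Int) = 2))]
      set c := (L+1)/2 with hc
      have hc2 : 2 ≤ c := by omega
      have hFpos : 0 < (10:Nat) ^ (c-1) := pow_pos (by norm_num) _
      obtain ⟨N, hN⟩ : ∃ N : Nat, q - 1 = (N:Int) := ⟨(q-1).toNat, by omega⟩
      have hNlt : N < 9 * 10 ^ (c-1) := by
        have h9 : q ≤ 9 * ((10 ^ (c - 1) : Nat) : Int) := by omega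
        omega
      have hdivA : PySem.Int.floordiv (q-1) ((10 ^ (c-1) : Nat):Int)
          = ((N / 10 ^ (c-1) : Nat):Int) := by
        rw [hN]; exact_mod_cast PySem.Int.floordiv_natCast N (10 ^ (c-1))
      have hmodA : PySem.Int.mod (q-1) ((10 ^ (c-1) : Nat):Int)
          = ((N % 10 ^ (c-1) : Nat):Int) := by
        rw [hN]; exact_mod_cast PySem.Int.mod_natCast N (10 ^ (c-1))
      rw [hdivA, hmodA]
      set o := N / 10 ^ (c-1) + 1 with ho
      rw [show ((N / 10 ^ (c-1) : Nat):Int) + 1 = ((o:Nat):Int) from by rw [ho]; push_cast; ring]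
      set r := N % 10 ^ (c-1) with hr
      have ho1 : 1 ≤ o := by rw [ho]; exact Nat.le_add_left 1 _
      have hdl : N / 10 ^ (c-1) < 9 := by rw [Nat.div_lt_iff_lt_mul hFpos]; omega
      have ho9 : o ≤ 9 := by rw [ho]; exact Nat.succ_le_of_lt hdl
      have hrlt : r < 10 ^ (c-1) := Nat.mod_lt _ hFpos
      rw [pvToChars_small ((o:Nat):Int) (Int.natCast_nonneg o)
            (by exact_mod_cast (Nat.lt_succ_of_le ho9)),
          Int.toNat_natCast]
      rw [Int.toNat_natCast L]
      rw [show (L:Int) - 2 = (((L - 2 : Nat)):Int) by omega]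
      rw [pvGetInner_eq L (L-2) r (by omega) (by omega)
        (by rw [show (L-2+1)/2 = c - 1 from by omega]; exact hrlt)]
      rw [show (L-2+1)/2 = c - 1 from by omega]
      have h2 : o * 10 ^ (c-1) + r = 10 ^ (c-1) + N := by
        have hdm : 10 ^ (c-1) * (N / 10 ^ (c-1)) + N % 10 ^ (c-1) = N :=
          Nat.div_add_mod N (10 ^ (c-1))
        calc o * 10 ^ (c-1) + r
            = 10 ^ (c-1) * (N / 10 ^ (c-1)) + N % 10 ^ (c-1) + 10 ^ (c-1) := by
              rw [ho, hr]; ring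
          _ = 10 ^ (c-1) + N := by rw [hdm]; ring
      have hBarg : ((10 ^ ((L+1)/2 - 1) : Nat) : Int) + q - 1
          = ((o * 10 ^ (c-1) + r : Nat) : Int) := by
        rw [h2, show (10:Nat)^(c-1) = 10^((L+1)/2 - 1) from by rw [hc]]
        push_cast
        omega
      rw [hBarg, pvToChars_split (c-1) o r ho1 ho9 hrlt]
      rw [PySem.List.slice?_none_none_neg_one, Option.getD_some]
      rw [show PySem.Int.mod ((L:Int)) 2 = (((L % 2 : Nat)):Int) from by
            exact_mod_cast PySem.Int.mod_natCast L 2,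
          PySem.List.slice_from_natCast]
      rw [List.reverse_cons,
        List.drop_append_of_le_length (by rw [List.length_reverse, pvPad_length]; omega),
        show (L-2) % 2 = L % 2 from by omega]
      simp

-- ===== VERDICT (by name: the statement is the Claim_ definition above) =====
theorem kthPalindrome1_spec : Claim_equal_kthPalindrome1 := by
  intro queries intLength _ hpre
  unfold Spec_kthPalindrome1
  rw [pvFoldA, pvFoldB]
  exact List.map_congr_left (fun q hqmem => pvElem_eq intLength q (hpre q hqmem))
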